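-- pv_equiv track=rewrite | github.com/SamuilDichev/UoM-MSc-Advanced-Computer-Science | COMP61511/week3/wc.py | preprocessArgs
-- ===== SOURCE A (Python) =====
-- def preprocessArgs(args):
--   flags = []
--   files = []
--   onlyFilesLeft = False
--   for arg in args:
--     if str(arg) == "--":
--       onlyFilesLeft = True
--
--     if not onlyFilesLeft and not isFileArg(arg):
--       flags.append(arg)
--     elif onlyFilesLeft or isFileArg(arg):
--       files.append(arg)
--
--   return flags + files
--
-- def isFileArg(arg):
--   return not str(arg).startswith("-") or str(arg) == "-" or str(arg) == "--"
-- ===== SOURCE B (Python) =====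
-- def isFileArg(arg):
--   return not str(arg).startswith("-") or str(arg) == "-" or str(arg) == "--"
--
-- def preprocessArgs(args):
--   args = list(args)
--   cutoff = next((i for i, a in enumerate(args) if str(a) == "--"), len(args))
--   prefix = args[:cutoff]
--   flags = [a for a in prefix if not isFileArg(a)]
--   files = [a for a in prefix if isFileArg(a)] + args[cutoff:]
--   return flags + files
-- ===== Notes on version B (the rewrite author's own statement) =====
-- stated objective: simpler
-- what changed: Replaces the single stateful boolean-flag loop with a locate-the-'--'-marker-then-partition shape: find the cutoff index of the first '--', partition the prefix with isFileArg, and append everything from the cutoff onward to files.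
import Mathlib
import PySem

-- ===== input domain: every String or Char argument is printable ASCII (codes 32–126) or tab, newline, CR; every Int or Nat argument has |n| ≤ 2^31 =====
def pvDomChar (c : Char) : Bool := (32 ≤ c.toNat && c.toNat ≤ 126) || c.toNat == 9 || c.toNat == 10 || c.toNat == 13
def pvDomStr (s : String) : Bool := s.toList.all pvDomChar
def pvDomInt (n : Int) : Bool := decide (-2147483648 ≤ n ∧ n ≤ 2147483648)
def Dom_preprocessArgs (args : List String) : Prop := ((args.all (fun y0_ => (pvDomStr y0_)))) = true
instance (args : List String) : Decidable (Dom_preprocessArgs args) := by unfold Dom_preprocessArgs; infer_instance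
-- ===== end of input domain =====

-- B replaces A's stateful boolean-flag loop by locating the first "--" and partitioning the prefix (objective: simpler).


-- ===== PORT A =====
def pvIsFileArg (arg : String) : Bool :=
  !(PySem.Str.startswith arg "-") || arg == "-" || arg == "--"

-- one iteration of A's for-loop over state (flags, files, onlyFilesLeft)
def pvStepA (st : List String × List String × Bool) (arg : String) :
    List String × List String × Bool :=
  let st := if arg == "--" then (st.1, st.2.1, true) else st
  if !st.2.2 && !pvIsFileArg arg then (st.1 ++ [arg], st.2.1, st.2.2)
  else if st.2.2 || pvIsFileArg arg then (st.1, st.2.1 ++ [arg], st.2.2)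
  else st

def preprocessArgs (args : List String) : List String :=
  let r := args.foldl pvStepA ([], [], false)
  r.1 ++ r.2.1

-- ===== PORT B =====
def preprocessArgs_alt (args : List String) : List String :=
  let cutoff := args.findIdx (fun a => a == "--")
  let pre := args.take cutoff
  let flags := pre.filter (fun a => !pvIsFileArg a)
  let files := pre.filter (fun a => pvIsFileArg a) ++ args.drop cutoff
  flags ++ files

-- ===== PRECONDITION & SPEC =====
def Spec_preprocessArgs (args : List String) (out : List String) : Prop := out = preprocessArgs_alt args
instance (args : List String) (out : List String) : Decidable (Spec_preprocessArgs args out) := by unfold Spec_preprocessArgs; infer_instance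

-- ===== CLAIM (what is proved, stated in full; the proofs are below) =====
def Claim_equal_preprocessArgs : Prop := ∀ (args : List String), Dom_preprocessArgs args → Spec_preprocessArgs args (preprocessArgs args)

-- ===== LEMMAS AND PROOFS =====

-- once the marker has been seen, every remaining argument is appended to files
theorem pvFoldA_true (l : List String) (fl fi : List String) :
    l.foldl pvStepA (fl, fi, true) = (fl, fi ++ l, true) := by
  induction l generalizing fi with
  | nil => simp
  | cons a t ih =>
      simp only [List.foldl_cons]
      have h : pvStepA (fl, fi, true) a = (fl, fi ++ [a], true) := by
        simp [pvStepA]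
      rw [h, ih]
      simp

-- characterization of A's fold before the marker has been seen
theorem pvFoldA_false (l : List String) (fl fi : List String) :
    l.foldl pvStepA (fl, fi, false) =
      (fl ++ (l.take (l.findIdx (fun a => a == "--"))).filter (fun a => !pvIsFileArg a),
       fi ++ (l.take (l.findIdx (fun a => a == "--"))).filter (fun a => pvIsFileArg a)
          ++ l.drop (l.findIdx (fun a => a == "--")),
       decide (l.findIdx (fun a => a == "--") < l.length)) := by
  induction l generalizing fl fi with
  | nil => simp
  | cons a t ih =>
      by_cases hm : a = "--"
      · subst hm
        simp only [List.foldl_cons]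
        have h : pvStepA (fl, fi, false) "--" = (fl, fi ++ ["--"], true) := by
          simp [pvStepA, pvIsFileArg]
        rw [h, pvFoldA_true]
        simp [List.findIdx_cons]
      · have hfi : (a :: t).findIdx (fun a => a == "--") =
            t.findIdx (fun a => a == "--") + 1 := by
          have hne : (a == "--") = false := by simp [hm]
          simp [List.findIdx_cons, hne]
        by_cases hf : pvIsFileArg a = true
        · simp only [List.foldl_cons]
          have h : pvStepA (fl, fi, false) a = (fl, fi ++ [a], false) := by
            simp [pvStepA, hm, hf]
          rw [h, ih]
          simp [hfi, hf]
        · simp only [List.foldl_cons]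
          have h : pvStepA (fl, fi, false) a = (fl ++ [a], fi, false) := by
            simp [pvStepA, hm, hf]
          rw [h, ih]
          simp [hfi, hf]

-- ===== VERDICT (by name: the statement is the Claim_ definition above) =====
theorem preprocessArgs_spec : Claim_equal_preprocessArgs := by
  intro args _
  show _ = _
  simp only [preprocessArgs, preprocessArgs_alt, pvFoldA_false]
  simp
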